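-- pv_equiv track=rewrite | github.com/mjlak1000/spec-1 | src/spec1_engine/briefing/writer.py | _extract_prompts
-- ===== SOURCE A (Python) =====
-- def _extract_prompts(brief: str) -> list[str]:
--     """Extract CLAUDE PROMPT blockquote blocks from a generated brief.
--
--     Returns a list of blockquote strings, one per lead.
--     """
--     prompts = []
--     lines = brief.splitlines()
--     i = 0
--     while i < len(lines):
--         stripped = lines[i].strip()
--         if stripped.startswith(">") and "**CLAUDE PROMPT:**" in stripped:
--             block_lines = []
--             while i < len(lines) and lines[i].strip().startswith(">"):
--                 block_lines.append(lines[i])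
--                 i += 1
--             prompts.append("\n".join(block_lines))
--         else:
--             i += 1
--     return prompts
-- ===== SOURCE B (Python) =====
-- def _first_prompt_suffix(run):
--     """Return run sliced from its first CLAUDE PROMPT line, or None."""
--     for j, line in enumerate(run):
--         if "**CLAUDE PROMPT:**" in line.strip():
--             return run[j:]
--     return None
--
--
-- def _extract_prompts(brief: str) -> list[str]:
--     """Extract CLAUDE PROMPT blockquote blocks from a generated brief.
--
--     Group-first decomposition: collect the maximal runs of blockquote
--     lines, then project each run onto its prompt block.
--     """
--     runs = []
--     cur = None
--     for line in brief.splitlines():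
--         if line.strip().startswith(">"):
--             if cur is None:
--                 cur = []
--                 runs.append(cur)
--             cur.append(line)
--         else:
--             cur = None
--     out = []
--     for run in runs:
--         suffix = _first_prompt_suffix(run)
--         if suffix is not None:
--             out.append("\n".join(suffix))
--     return out
-- ===== Notes on version B (the rewrite author's own statement) =====
-- stated objective: alternative
-- what changed: Replaced A's interleaved index-walking scan (outer while with a shared inner while that advances the same index) by a two-pass group-then-project decomposition: first group lines into maximal blockquote runs, then slice each run from its first CLAUDE PROMPT line.
import Mathlib
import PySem

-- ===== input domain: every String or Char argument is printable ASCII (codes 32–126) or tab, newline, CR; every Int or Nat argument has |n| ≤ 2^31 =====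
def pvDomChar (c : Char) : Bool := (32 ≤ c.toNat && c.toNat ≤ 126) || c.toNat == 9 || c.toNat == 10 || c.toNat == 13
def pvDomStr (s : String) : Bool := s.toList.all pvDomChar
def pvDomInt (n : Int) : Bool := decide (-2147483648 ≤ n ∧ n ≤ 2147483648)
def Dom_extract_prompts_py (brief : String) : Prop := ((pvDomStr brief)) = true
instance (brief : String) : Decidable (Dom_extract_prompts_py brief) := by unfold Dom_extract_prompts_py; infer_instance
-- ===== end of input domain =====

-- B replaces A's interleaved index-walking scan by a group-runs-then-project decomposition (alternative, same cost).

-- ===== PORT A =====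
-- inner while: collect consecutive blockquote lines, return (block_lines, remaining lines)
def pvCollectA : List String → List String → List String × List String
  | [], acc => (acc, [])
  | l :: ls, acc =>
    if PySem.Str.startswith (PySem.Str.strip l) ">" then pvCollectA ls (acc ++ [l])
    else (acc, l :: ls)

theorem pvCollectA_cons (l : String) (ls acc : List String) :
    pvCollectA (l :: ls) acc =
      if PySem.Str.startswith (PySem.Str.strip l) ">" then pvCollectA ls (acc ++ [l])
      else (acc, l :: ls) := rfl

theorem pvCollectA_len (ls acc : List String) : (pvCollectA ls acc).2.length ≤ ls.length := by
  induction ls generalizing acc with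
  | nil => simp [pvCollectA]
  | cons l ls ih =>
    rw [pvCollectA_cons]
    split
    · exact Nat.le_succ_of_le (ih _)
    · simp

theorem pvCollectA_len_lt (l : String) (ls acc : List String)
    (h : PySem.Str.startswith (PySem.Str.strip l) ">" = true) :
    (pvCollectA (l :: ls) acc).2.length < (l :: ls).length := by
  rw [pvCollectA_cons, if_pos h]
  exact Nat.lt_succ_of_le (pvCollectA_len _ _)

def pvGoA : List String → List String → List String
  | [], prompts => prompts
  | l :: ls, prompts =>
    let stripped := PySem.Str.strip l
    if h : (PySem.Str.startswith stripped ">" && PySem.Str.isIn "**CLAUDE PROMPT:**" stripped) = true then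
      let p := pvCollectA (l :: ls) []
      pvGoA p.2 (prompts ++ [PySem.Str.join "\n" p.1])
    else
      pvGoA ls prompts
termination_by ls _ => ls.length
decreasing_by
  · exact pvCollectA_len_lt l ls [] ((Bool.and_eq_true _ _).mp h).1
  · exact Nat.lt_succ_self _

def extract_prompts_py (brief : String) : List String :=
  pvGoA (PySem.Str.splitlines brief) []

-- ===== PORT B =====
-- pass 1: group lines into maximal runs of blockquote lines (cur = the open run)
def pvGroupB : List String → List (List String) → Option (List String) → List (List String)
  | [], runs, cur =>
    match cur with
    | some r => runs ++ [r]
    | none => runs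
  | l :: ls, runs, cur =>
    if PySem.Str.startswith (PySem.Str.strip l) ">" then
      pvGroupB ls runs (some (cur.getD [] ++ [l]))
    else
      match cur with
      | some r => pvGroupB ls (runs ++ [r]) none
      | none => pvGroupB ls runs none

-- _first_prompt_suffix: run[j:] from the first CLAUDE PROMPT line, or none
def pvFirstB : List String → Option (List String)
  | [] => none
  | l :: ls =>
    if PySem.Str.isIn "**CLAUDE PROMPT:**" (PySem.Str.strip l) then some (l :: ls)
    else pvFirstB ls

def extract_prompts_py_alt (brief : String) : List String :=
  (pvGroupB (PySem.Str.splitlines brief) [] none).foldl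
    (fun out run =>
      match pvFirstB run with
      | some suffix => out ++ [PySem.Str.join "\n" suffix]
      | none => out) []

-- ===== PRECONDITION & SPEC =====
def Spec_extract_prompts_py (brief : String) (out : List String) : Prop := out = extract_prompts_py_alt brief
instance (brief : String) (out : List String) : Decidable (Spec_extract_prompts_py brief out) := by unfold Spec_extract_prompts_py; infer_instance

-- ===== CLAIM (what is proved, stated in full; the proofs are below) =====
def Claim_equal_extract_prompts_py : Prop := ∀ (brief : String), Dom_extract_prompts_py brief → Spec_extract_prompts_py brief (extract_prompts_py brief)

-- ===== LEMMAS AND PROOFS =====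

-- abbreviations for the two line predicates (proof-side only)
def pvP (l : String) : Bool := PySem.Str.startswith (PySem.Str.strip l) ">"
def pvM (l : String) : Bool := PySem.Str.isIn "**CLAUDE PROMPT:**" (PySem.Str.strip l)

theorem pvCollectA_cons' (l : String) (ls acc : List String) :
    pvCollectA (l :: ls) acc =
      if pvP l then pvCollectA ls (acc ++ [l]) else (acc, l :: ls) := rfl

theorem pvGroupB_cons (l : String) (ls : List String) (runs : List (List String))
    (cur : Option (List String)) :
    pvGroupB (l :: ls) runs cur =
      if pvP l then pvGroupB ls runs (some (cur.getD [] ++ [l]))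
      else
        match cur with
        | some r => pvGroupB ls (runs ++ [r]) none
        | none => pvGroupB ls runs none := rfl

theorem pvFirstB_cons (l : String) (ls : List String) :
    pvFirstB (l :: ls) = if pvM l then some (l :: ls) else pvFirstB ls := rfl

-- the run projection of B's second pass
def pvProj (run : List String) : List String :=
  match pvFirstB run with
  | some suffix => [PySem.Str.join "\n" suffix]
  | none => []

-- common recursive characterisation of both programs
def pvSpec : List String → List String
  | [] => []
  | l :: ls =>
    if pvP l then pvProj (l :: ls.takeWhile pvP) ++ pvSpec (ls.dropWhile pvP)
    else pvSpec ls
termination_by ls => ls.length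
decreasing_by
  · exact Nat.lt_succ_of_le (List.length_dropWhile_le _ _)
  · exact Nat.lt_succ_self _

theorem pvCollectA_eq (ls acc : List String) :
    pvCollectA ls acc = (acc ++ ls.takeWhile pvP, ls.dropWhile pvP) := by
  induction ls generalizing acc with
  | nil => simp [pvCollectA]
  | cons l ls ih =>
    rw [pvCollectA_cons']
    by_cases h : pvP l = true
    · rw [if_pos h, ih, List.takeWhile_cons, List.dropWhile_cons, if_pos h, if_pos h]
      simp
    · rw [if_neg h, List.takeWhile_cons, List.dropWhile_cons, if_neg h, if_neg h]
      simp

theorem pvSpec_head (ls : List String) :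
    pvSpec ls = pvProj (ls.takeWhile pvP) ++ pvSpec (ls.dropWhile pvP) := by
  cases ls with
  | nil => simp [pvSpec, pvProj, pvFirstB]
  | cons l ls =>
    by_cases h : pvP l = true
    · rw [pvSpec, if_pos h, List.takeWhile_cons, List.dropWhile_cons, if_pos h, if_pos h]
    · rw [List.takeWhile_cons, List.dropWhile_cons, if_neg h, if_neg h]
      simp [pvProj, pvFirstB]

theorem pvGoA_eq (n : Nat) (ls prompts : List String) (hn : ls.length ≤ n) :
    pvGoA ls prompts = prompts ++ pvSpec ls := by
  induction n generalizing ls prompts with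
  | zero =>
    have h0 : ls = [] := List.eq_nil_of_length_eq_zero (Nat.le_zero.mp hn)
    subst h0; simp [pvGoA, pvSpec]
  | succ n ih =>
    cases ls with
    | nil => simp [pvGoA, pvSpec]
    | cons l ls =>
      by_cases hp : pvP l = true
      · by_cases hm : pvM l = true
        · have hc : (PySem.Str.startswith (PySem.Str.strip l) ">" &&
              PySem.Str.isIn "**CLAUDE PROMPT:**" (PySem.Str.strip l)) = true :=
            (Bool.and_eq_true _ _).mpr ⟨hp, hm⟩
          rw [pvGoA, dif_pos hc, pvCollectA_eq]
          simp only [List.nil_append]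
          rw [List.takeWhile_cons, List.dropWhile_cons, if_pos hp, if_pos hp]
          rw [ih _ _ (Nat.le_trans (List.length_dropWhile_le _ _) (Nat.le_of_succ_le_succ hn))]
          rw [pvSpec, if_pos hp]
          have hproj : pvProj (l :: ls.takeWhile pvP) = [PySem.Str.join "\n" (l :: ls.takeWhile pvP)] := by
            rw [pvProj, pvFirstB_cons, if_pos hm]
          rw [hproj]
          simp
        · have hc : ¬ (PySem.Str.startswith (PySem.Str.strip l) ">" &&
              PySem.Str.isIn "**CLAUDE PROMPT:**" (PySem.Str.strip l)) = true :=
            fun hco => hm ((Bool.and_eq_true _ _).mp hco).2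
          rw [pvGoA, dif_neg hc]
          rw [ih _ _ (Nat.le_of_succ_le_succ hn)]
          rw [pvSpec, if_pos hp]
          have h1 : pvProj (l :: ls.takeWhile pvP) = pvProj (ls.takeWhile pvP) := by
            rw [pvProj, pvFirstB_cons, if_neg hm, pvProj]
          rw [h1, ← pvSpec_head]
      · have hc : ¬ (PySem.Str.startswith (PySem.Str.strip l) ">" &&
            PySem.Str.isIn "**CLAUDE PROMPT:**" (PySem.Str.strip l)) = true :=
          fun hco => hp ((Bool.and_eq_true _ _).mp hco).1
        rw [pvGoA, dif_neg hc]
        rw [ih _ _ (Nat.le_of_succ_le_succ hn), pvSpec, if_neg hp]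

-- B's grouping pass: the accumulator factors out
theorem pvGroupB_acc (ls : List String) (runs : List (List String)) (cur : Option (List String)) :
    pvGroupB ls runs cur = runs ++ pvGroupB ls [] cur := by
  induction ls generalizing runs cur with
  | nil => cases cur <;> simp [pvGroupB]
  | cons l ls ih =>
    rw [pvGroupB_cons, pvGroupB_cons]
    by_cases h : pvP l = true
    · rw [if_pos h, if_pos h, ih]
    · rw [if_neg h, if_neg h]
      cases cur with
      | none =>
        show pvGroupB ls runs none = runs ++ pvGroupB ls [] none
        exact ih _ _
      | some r =>
        show pvGroupB ls (runs ++ [r]) none = runs ++ pvGroupB ls ([] ++ [r]) none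
        rw [ih (runs ++ [r]) none, ih ([] ++ [r]) none]
        simp

-- an open run closes at the end of the blockquote run
theorem pvGroupB_open (ls : List String) (r : List String) :
    pvGroupB ls [] (some r) = [r ++ ls.takeWhile pvP] ++ pvGroupB (ls.dropWhile pvP) [] none := by
  induction ls generalizing r with
  | nil => simp [pvGroupB]
  | cons l ls ih =>
    rw [pvGroupB_cons]
    by_cases h : pvP l = true
    · rw [if_pos h, List.takeWhile_cons, List.dropWhile_cons, if_pos h, if_pos h]
      simp only [Option.getD_some]
      rw [ih]
      simp
    · rw [if_neg h, List.takeWhile_cons, List.dropWhile_cons, if_neg h, if_neg h]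
      show pvGroupB ls ([] ++ [r]) none = [r ++ []] ++ pvGroupB (l :: ls) [] none
      rw [pvGroupB_acc ls ([] ++ [r]) none, pvGroupB_cons, if_neg h]
      show [] ++ [r] ++ pvGroupB ls [] none = [r ++ []] ++ pvGroupB ls [] none
      simp

-- B's second pass is a flatMap of the run projection
theorem pvFold_proj (runs : List (List String)) (out : List String) :
    runs.foldl (fun out run =>
      match pvFirstB run with
      | some suffix => out ++ [PySem.Str.join "\n" suffix]
      | none => out) out = out ++ runs.flatMap pvProj := by
  induction runs generalizing out with
  | nil => simp
  | cons run runs ih =>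
    simp only [List.foldl_cons, List.flatMap_cons, pvProj]
    cases h : pvFirstB run <;> simp only [h, ih] <;> simp

theorem pvGroupB_spec (n : Nat) (ls : List String) (hn : ls.length ≤ n) :
    (pvGroupB ls [] none).flatMap pvProj = pvSpec ls := by
  induction n generalizing ls with
  | zero =>
    have h0 : ls = [] := List.eq_nil_of_length_eq_zero (Nat.le_zero.mp hn)
    subst h0; simp [pvGroupB, pvSpec]
  | succ n ih =>
    cases ls with
    | nil => simp [pvGroupB, pvSpec]
    | cons l ls =>
      rw [pvGroupB_cons]
      by_cases h : pvP l = true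
      · rw [if_pos h]
        simp only [Option.getD_none, List.nil_append]
        rw [pvGroupB_open, pvSpec, if_pos h]
        simp only [List.flatMap_append, List.flatMap_cons, List.flatMap_nil, List.append_nil]
        rw [ih _ (Nat.le_trans (List.length_dropWhile_le _ _) (Nat.le_of_succ_le_succ hn))]
        simp
      · rw [if_neg h, pvSpec, if_neg h]
        exact ih _ (Nat.le_of_succ_le_succ hn)

-- ===== VERDICT (by name: the statement is the Claim_ definition above) =====
theorem extract_prompts_py_spec : Claim_equal_extract_prompts_py := by
  intro brief _
  unfold Spec_extract_prompts_py extract_prompts_py extract_prompts_py_alt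
  rw [pvGoA_eq (PySem.Str.splitlines brief).length _ _ (Nat.le_refl _)]
  rw [pvFold_proj]
  rw [pvGroupB_spec (PySem.Str.splitlines brief).length _ (Nat.le_refl _)]
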